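-- pv_equiv track=rewrite | github.com/protabit/protherm-conversion | utils/sequence.py | remove_extra_chains
-- ===== SOURCE A (Python) =====
-- ACCEPTEDAA=['A','C','D','E','F','G','H','I','K','L','M','N','P','Q','R','S','T','V','W','Y']
--
-- def valid_protein_sequence(seq):
--     """
--     seq -- is a string of characters, checks if the sequence is allowed
--     """
--     if seq is None or seq=="":
--         return False
--     for chain in seq.split("/"):
--         chain_sequence=chain[(chain.find(':')+1):]
--         for letter in chain_sequence:
--             if letter not in ACCEPTEDAA:
--                 return False
--     return True
--
-- def remove_extra_chains(sequence):
--     """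
--     If it has multiple chains that are identical, only return one chain
--     """
--     if not valid_protein_sequence(sequence):
--         return sequence
--     elif '/' in sequence:
--         chains=set()
--         for chain in sequence.split('/'):
--             chains.add(chain[(chain.find(':')+1):])
--         if len(chains)==1:
--             return chains.pop()
--     return sequence
-- ===== SOURCE B (Python) =====
-- ACCEPTEDAA=['A','C','D','E','F','G','H','I','K','L','M','N','P','Q','R','S','T','V','W','Y']
--
-- def remove_extra_chains(sequence):
--     """
--     Single fused pass: validate each chain and compare its body to the first
--     chain's body as we go, instead of a separate validation pass plus a set.
--     """
--     if not sequence: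
--         return sequence
--     first = None
--     all_same = True
--     for chain in sequence.split('/'):
--         body = chain[chain.find(':') + 1:]
--         for letter in body:
--             if letter not in ACCEPTEDAA:
--                 return sequence
--         if first is None:
--             first = body
--         elif body != first:
--             all_same = False
--     if all_same and '/' in sequence:
--         return first
--     return sequence
-- ===== Notes on version B (the rewrite author's own statement) =====
-- stated objective: simpler
-- what changed: One fused pass over the chains that validates letters and compares each chain body to the first body (a boolean all-same flag), replacing the separate valid_protein_sequence pre-pass plus set construction; no set is built at all.
import Mathlib
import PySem

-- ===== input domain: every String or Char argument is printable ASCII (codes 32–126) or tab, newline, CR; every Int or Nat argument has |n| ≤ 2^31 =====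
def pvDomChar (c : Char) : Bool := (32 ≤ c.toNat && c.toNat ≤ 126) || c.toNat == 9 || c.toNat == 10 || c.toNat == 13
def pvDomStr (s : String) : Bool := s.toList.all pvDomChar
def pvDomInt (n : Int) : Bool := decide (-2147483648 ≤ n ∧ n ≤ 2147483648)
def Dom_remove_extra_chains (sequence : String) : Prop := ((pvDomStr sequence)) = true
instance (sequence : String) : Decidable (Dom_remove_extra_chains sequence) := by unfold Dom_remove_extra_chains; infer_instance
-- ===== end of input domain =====

-- B is a single fused pass (validate + compare each chain body to the first body) instead of
-- A's separate validation pass plus a set; equivalence is about the return value only.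

-- ===== PORT A =====
def ACCEPTEDAA : List Char :=
  ['A','C','D','E','F','G','H','I','K','L','M','N','P','Q','R','S','T','V','W','Y']

-- chain[(chain.find(':')+1):]
def chainBody (chain : String) : String :=
  PySem.Str.slice chain (some (PySem.Str.find chain ":" + 1)) none

def valid_protein_sequence (seq : String) : Bool :=
  if seq = "" then false
  else ((PySem.Str.split? seq "/").getD []).all
    (fun chain => (chainBody chain).toList.all (fun letter => letter ∈ ACCEPTEDAA))

def remove_extra_chains (sequence : String) : String :=
  if !valid_protein_sequence sequence then sequence
  else if PySem.Str.isIn "/" sequence then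
    let chains : PySem.Set String :=
      ((PySem.Str.split? sequence "/").getD []).foldl
        (fun s chain => PySem.Set.add s (chainBody chain)) PySem.Set.empty
    if PySem.Set.len chains = 1 then chains.headD sequence else sequence
  else sequence

-- ===== PORT B =====
-- the fused loop of Source B: early-returns sequence on an invalid letter, otherwise tracks
-- the first body and an all-same flag
def altLoop (sequence : String) (first : Option String) (allSame : Bool) :
    List String → String
  | [] =>
      if allSame && PySem.Str.isIn "/" sequence then
        match first with
        | some f => f
        | none => sequence
      else sequence
  | chain :: rest =>
      let body := PySem.Str.slice chain (some (PySem.Str.find chain ":" + 1)) none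
      if body.toList.all (fun letter => letter ∈ ACCEPTEDAA) then
        match first with
        | none => altLoop sequence (some body) allSame rest
        | some f => altLoop sequence (some f) (allSame && !(body ≠ f)) rest
      else sequence

def remove_extra_chains_alt (sequence : String) : String :=
  if sequence = "" then sequence
  else altLoop sequence none true ((PySem.Str.split? sequence "/").getD [])

-- ===== PRECONDITION & SPEC =====
def Spec_remove_extra_chains (sequence : String) (out : String) : Prop := out = remove_extra_chains_alt sequence
instance (sequence : String) (out : String) : Decidable (Spec_remove_extra_chains sequence out) := by unfold Spec_remove_extra_chains; infer_instance

-- ===== CLAIM (what is proved, stated in full; the proofs are below) =====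
def Claim_equal_remove_extra_chains : Prop := ∀ (sequence : String), Dom_remove_extra_chains sequence → Spec_remove_extra_chains sequence (remove_extra_chains sequence)

-- ===== LEMMAS AND PROOFS =====

def chainValid (chain : String) : Bool :=
  (chainBody chain).toList.all (fun letter => letter ∈ ACCEPTEDAA)

lemma altLoop_some_spec (seq f : String) (acc : Bool) (l : List String) :
    altLoop seq (some f) acc l =
      if l.all chainValid then
        (if acc && (l.all (fun c => decide (chainBody c = f))
              && PySem.Str.isIn "/" seq)
         then f else seq)
      else seq := by
  induction l generalizing acc with
  | nil => simp [altLoop]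
  | cons c rest ih =>
      simp only [altLoop, chainBody]
      by_cases hv : ((PySem.Str.slice c (some (PySem.Str.find c ":" + 1)) none).toList.all
          (fun letter => letter ∈ ACCEPTEDAA)) = true
      · have hc : chainValid c = true := by simpa [chainValid, chainBody] using hv
        rw [if_pos hv, ih]
        simp only [List.all_cons, hc, Bool.true_and]
        cases hr : rest.all chainValid
        · rw [if_neg (by simp), if_neg (by simp)]
        · rw [if_pos rfl, if_pos rfl]
          simp only [chainBody, ne_eq, decide_not, Bool.not_not, Bool.and_assoc]
          rfl
      · rw [if_neg hv]
        have hc : chainValid c = false := by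
          simpa [chainValid, chainBody] using hv
        simp only [List.all_cons, hc, Bool.false_and]
        rw [if_neg (by simp)]

lemma foldl_add_len_mono (s : List String) (l : List String) :
    s.length ≤ (l.foldl PySem.Set.add s).length := by
  induction l generalizing s with
  | nil => simp
  | cons x rest ih =>
      refine le_trans ?_ (ih (PySem.Set.add s x))
      simp only [PySem.Set.add]
      split
      · exact le_rfl
      · simp

lemma foldl_add_all_eq (b : String) (l : List String)
    (h : l.all (fun x => x == b) = true) :
    l.foldl PySem.Set.add [b] = [b] := by
  induction l with
  | nil => rfl
  | cons x rest ih =>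
      simp only [List.all_cons, Bool.and_eq_true, beq_iff_eq] at h
      obtain ⟨hx, hr⟩ := h
      subst hx
      have : PySem.Set.add [x] x = [x] := by
        simp [PySem.Set.add, PySem.Set.contains]
      simpa [List.foldl_cons, this] using ih hr

lemma foldl_add_not_all (b : String) (l : List String)
    (h : l.all (fun x => x == b) = false) :
    2 ≤ (l.foldl PySem.Set.add [b]).length := by
  induction l with
  | nil => simp at h
  | cons x rest ih =>
      simp only [List.all_cons, Bool.and_eq_false_iff] at h
      by_cases hx : x = b
      · subst hx
        have hadd : PySem.Set.add [x] x = [x] := by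
          simp [PySem.Set.add, PySem.Set.contains]
        rcases h with h | h
        · simp at h
        · simpa [List.foldl_cons, hadd] using ih h
      · have hadd : PySem.Set.add [b] x = [b, x] := by
          simp [PySem.Set.add, PySem.Set.contains, hx]
        calc (2 : Nat) = ([b, x] : List String).length := rfl
          _ ≤ _ := by rw [List.foldl_cons, hadd]; exact foldl_add_len_mono _ _

-- ===== VERDICT (by name: the statement is the Claim_ definition above) =====
theorem remove_extra_chains_spec : Claim_equal_remove_extra_chains := by
  intro seq _
  show remove_extra_chains seq = remove_extra_chains_alt seq
  by_cases h0 : seq = ""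
  · simp [remove_extra_chains, remove_extra_chains_alt, valid_protein_sequence, h0]
  · unfold remove_extra_chains remove_extra_chains_alt valid_protein_sequence
    simp only [if_neg h0]
    cases hcs : (PySem.Str.split? seq "/").getD [] with
    | nil => simp [altLoop, PySem.Set.len, PySem.Set.empty]
    | cons c0 rest =>
        by_cases hv0 : chainValid c0 = true
        · have hb0 : ((PySem.Str.slice c0 (some (PySem.Str.find c0 ":" + 1)) none).toList.all
              (fun letter => letter ∈ ACCEPTEDAA)) = true := hv0
          have hBstep : altLoop seq none true (c0 :: rest) =
              altLoop seq (some (PySem.Str.slice c0 (some (PySem.Str.find c0 ":" + 1)) none)) true rest := by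
            rw [show altLoop seq none true (c0 :: rest) =
                (if (PySem.Str.slice c0 (some (PySem.Str.find c0 ":" + 1)) none).toList.all
                    (fun letter => letter ∈ ACCEPTEDAA) then
                  altLoop seq (some (PySem.Str.slice c0 (some (PySem.Str.find c0 ":" + 1)) none)) true rest
                else seq) from rfl, if_pos hb0]
          by_cases hvr : rest.all chainValid = true
          · -- every chain valid
            have hall : ((c0 :: rest).all
                (fun chain => (chainBody chain).toList.all (fun letter => letter ∈ ACCEPTEDAA))) = true := by
              simp only [List.all_cons, Bool.and_eq_true]
              exact ⟨hv0, by simpa [chainValid] using hvr⟩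
            rw [hall]
            simp only [Bool.not_true, Bool.false_eq_true, if_false]
            rw [hBstep, altLoop_some_spec, if_pos hvr, Bool.true_and]
            have hS : (c0 :: rest).foldl (fun s chain => PySem.Set.add s (chainBody chain))
                PySem.Set.empty = (rest.map chainBody).foldl PySem.Set.add [chainBody c0] := by
              rw [List.foldl_map]
              rfl
            cases hin : PySem.Str.isIn "/" seq
            · simp
            · simp only [Bool.and_true, if_pos rfl]
              by_cases heq : (rest.all fun c =>
                  decide (chainBody c = PySem.Str.slice c0 (some (PySem.Str.find c0 ":" + 1)) none)) = true
              · have hone : ((List.map chainBody rest).all (fun x => x == chainBody c0)) = true := by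
                  simpa [List.all_map, chainBody] using heq
                rw [heq, if_pos rfl, hS, foldl_add_all_eq _ _ hone]
                simp [PySem.Set.len, chainBody]
              · have hmany : ((List.map chainBody rest).all (fun x => x == chainBody c0)) = false := by
                  rw [Bool.eq_false_iff]
                  intro hc
                  exact heq (by simpa [List.all_map, chainBody] using hc)
                rw [Bool.eq_false_iff.mpr heq]
                simp only [Bool.false_and, Bool.and_false, Bool.true_and, Bool.false_eq_true,
                  if_false, if_true]
                rw [hS]
                have h2 := foldl_add_not_all _ _ hmany
                rw [if_neg (by
                  simp only [PySem.Set.len]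
                  omega)]
          · -- some later chain invalid: both return seq
            have hall : ((c0 :: rest).all
                (fun chain => (chainBody chain).toList.all (fun letter => letter ∈ ACCEPTEDAA))) = false := by
              have hvr' : rest.all chainValid = false := Bool.eq_false_iff.mpr hvr
              have hcv : (fun chain => (chainBody chain).toList.all
                  (fun letter => letter ∈ ACCEPTEDAA)) = chainValid := rfl
              rw [List.all_cons, hcv, hvr', Bool.and_false]
            rw [hall]
            simp only [Bool.not_false, if_pos rfl]
            rw [hBstep, altLoop_some_spec, if_neg hvr]
            simp
        · -- first chain already invalid: both return seq
          have hb0 : ((PySem.Str.slice c0 (some (PySem.Str.find c0 ":" + 1)) none).toList.all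
              (fun letter => letter ∈ ACCEPTEDAA)) = false := Bool.eq_false_iff.mpr hv0
          have hall : ((c0 :: rest).all
              (fun chain => (chainBody chain).toList.all (fun letter => letter ∈ ACCEPTEDAA))) = false := by
            simp only [List.all_cons, Bool.and_eq_false_iff]
            left; exact hb0
          rw [hall]
          simp only [Bool.not_false, if_pos rfl]
          rw [show altLoop seq none true (c0 :: rest) =
              (if (PySem.Str.slice c0 (some (PySem.Str.find c0 ":" + 1)) none).toList.all
                  (fun letter => letter ∈ ACCEPTEDAA) then
                altLoop seq (some (PySem.Str.slice c0 (some (PySem.Str.find c0 ":" + 1)) none)) true rest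
              else seq) from rfl, if_neg (Bool.eq_false_iff.mp hb0)]
          simp
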